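-- pv_equiv track=rewrite | github.com/arthurbabey/gradcam1D | blast_to_genebank.py | classify_region
-- ===== SOURCE A (Python) =====
-- def classify_region(features):
--     """
--     Classify a region based on the list of overlapping features.
--     Priority: coding > non-coding > intergenic
--     """
--     coding_types = {"CDS"}
--     noncoding_types = {"tRNA", "rRNA", "ncRNA", "misc_RNA"}
--
--     types = set(f["type"] for f in features)
--     if types & coding_types:
--         return "coding"
--     elif types & noncoding_types:
--         return "non-coding"
--     else:
--         return "intergenic"
-- ===== SOURCE B (Python) =====
-- _PRIORITY = {"CDS": 2, "tRNA": 1, "rRNA": 1, "ncRNA": 1, "misc_RNA": 1}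
-- _LABELS = ["intergenic", "non-coding", "coding"]
--
-- def classify_region(features):
--     """Table-driven: map each feature's type to a numeric priority via a
--     lookup table, reduce by max over all features, and index the label
--     table with the resulting rank (no membership tests, no if-chain)."""
--     rank = 0
--     for f in features:
--         rank = max(rank, _PRIORITY.get(f["type"], 0))
--     return _LABELS[rank]
-- ===== Notes on version B (the rewrite author's own statement) =====
-- stated objective: alternative
-- what changed: Replaces the set comprehension plus two set-intersection tests and the priority if-chain with a table-driven design: a priority dict maps each type to a numeric rank, the loop reduces by max, and the result is an index into a label table.
import Mathlib
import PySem

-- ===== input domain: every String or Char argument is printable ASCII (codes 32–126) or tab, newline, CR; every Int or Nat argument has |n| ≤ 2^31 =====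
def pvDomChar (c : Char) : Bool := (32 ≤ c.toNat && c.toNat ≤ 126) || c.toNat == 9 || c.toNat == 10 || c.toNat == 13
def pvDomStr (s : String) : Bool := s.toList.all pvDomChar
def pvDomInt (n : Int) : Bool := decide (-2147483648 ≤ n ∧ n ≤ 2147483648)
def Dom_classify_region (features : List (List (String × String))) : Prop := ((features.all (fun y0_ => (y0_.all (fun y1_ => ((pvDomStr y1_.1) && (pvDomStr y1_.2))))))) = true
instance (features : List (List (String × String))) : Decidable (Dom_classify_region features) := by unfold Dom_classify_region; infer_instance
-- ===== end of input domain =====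

-- B is table-driven: a priority dict maps each type to a numeric rank, the loop
-- reduces by max, and the result indexes a label table (objective: alternative).

-- f["type"] in total form: Pre_ guarantees the key is present, so getD is never taken.
def pvTy (f : List (String × String)) : String := ((PySem.Dict.mk f).get? "type").getD ""

-- ===== PORT A =====
def classify_region (features : List (List (String × String))) : String :=
  let coding_types : PySem.Set String := PySem.Set.ofList ["CDS"]
  let noncoding_types : PySem.Set String := PySem.Set.ofList ["tRNA", "rRNA", "ncRNA", "misc_RNA"]
  let types : PySem.Set String := PySem.Set.ofList (features.map (fun f => pvTy f))
  if PySem.Set.inter types coding_types ≠ [] then "coding"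
  else if PySem.Set.inter types noncoding_types ≠ [] then "non-coding"
  else "intergenic"

-- ===== PORT B =====
-- _PRIORITY.get(t, 0)
def pvPrio (t : String) : Int :=
  (PySem.Dict.mk [("CDS", (2 : Int)), ("tRNA", 1), ("rRNA", 1), ("ncRNA", 1), ("misc_RNA", 1)]).getD t 0

def classify_region_alt (features : List (List (String × String))) : String :=
  let labels : List String := ["intergenic", "non-coding", "coding"]
  let rank : Int := features.foldl (fun r f => max r (pvPrio (pvTy f))) 0
  -- _LABELS[rank]: rank is always 0, 1 or 2, so the getD default is never taken
  (PySem.List.pyGet? labels rank).getD ""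

-- ===== PRECONDITION & SPEC =====
-- Pre_ excludes exactly the inputs where Python A raises KeyError: a feature dict without a "type" key.
def Pre_classify_region (features : List (List (String × String))) : Prop :=
  ∀ f ∈ features, ((PySem.Dict.mk f).get? "type").isSome
instance (features : List (List (String × String))) : Decidable (Pre_classify_region features) := by
  unfold Pre_classify_region; infer_instance
def pvWitness_classify_region : (List (List (String × String))) := [[("type", "CDS")], [("type", "gene")]]
def Spec_classify_region (features : List (List (String × String))) (out : String) : Prop := out = classify_region_alt features
instance (features : List (List (String × String))) (out : String) : Decidable (Spec_classify_region features out) := by unfold Spec_classify_region; infer_instance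

-- ===== CLAIM (what is proved, stated in full; the proofs are below) =====
def Claim_equal_classify_region : Prop := ∀ (features : List (List (String × String))), Dom_classify_region features → Pre_classify_region features → Spec_classify_region features (classify_region features)

-- ===== LEMMAS AND PROOFS =====

-- A's "types & S" is nonempty iff some feature's type is in S.
theorem inter_ofList_ne_nil {l s : List String} :
    PySem.Set.inter (PySem.Set.ofList l) s ≠ [] ↔ ∃ y ∈ l, y ∈ s := by
  constructor
  · intro h
    rcases List.exists_mem_of_ne_nil _ h with ⟨y, hy⟩
    rw [PySem.Set.mem_inter] at hy
    exact ⟨y, (PySem.Set.mem_ofList _ _).1 hy.1, hy.2⟩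
  · rintro ⟨y, hy, hs⟩ hnil
    have : y ∈ PySem.Set.inter (PySem.Set.ofList l) s :=
      (PySem.Set.mem_inter _ _ _).2 ⟨(PySem.Set.mem_ofList _ _).2 hy, hs⟩
    simp [hnil] at this

-- Closed form of B's rank: the max priority over the list.
def pvRankC (l : List (List (String × String))) : Int :=
  if l.any (fun f => pvTy f == "CDS") then 2
  else if l.any (fun f => pvTy f == "tRNA" || pvTy f == "rRNA" || pvTy f == "ncRNA" || pvTy f == "misc_RNA") then 1
  else 0

theorem pvPrio_eq (t : String) :
    pvPrio t = if t == "CDS" then 2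
      else if t == "tRNA" || t == "rRNA" || t == "ncRNA" || t == "misc_RNA" then 1 else 0 := by
  by_cases h1 : t = "CDS"
  · subst h1; decide
  by_cases h2 : t = "tRNA"
  · subst h2; decide
  by_cases h3 : t = "rRNA"
  · subst h3; decide
  by_cases h4 : t = "ncRNA"
  · subst h4; decide
  by_cases h5 : t = "misc_RNA"
  · subst h5; decide
  have c1 : ("CDS" == t) = false := beq_eq_false_iff_ne.2 (fun h => h1 h.symm)
  have c2 : ("tRNA" == t) = false := beq_eq_false_iff_ne.2 (fun h => h2 h.symm)
  have c3 : ("rRNA" == t) = false := beq_eq_false_iff_ne.2 (fun h => h3 h.symm)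
  have c4 : ("ncRNA" == t) = false := beq_eq_false_iff_ne.2 (fun h => h4 h.symm)
  have c5 : ("misc_RNA" == t) = false := beq_eq_false_iff_ne.2 (fun h => h5 h.symm)
  simp [pvPrio, PySem.Dict.getD, PySem.Dict.get?, List.find?,
    c1, c2, c3, c4, c5, h1, h2, h3, h4, h5]

theorem pvRankC_cons (f : List (String × String)) (t : List (List (String × String))) :
    pvRankC (f :: t) = max (pvPrio (pvTy f)) (pvRankC t) := by
  rw [pvPrio_eq]; unfold pvRankC
  simp only [List.any_cons]
  by_cases h1 : pvTy f == "CDS" <;>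
    by_cases h2 : (pvTy f == "tRNA" || pvTy f == "rRNA" || pvTy f == "ncRNA" || pvTy f == "misc_RNA") <;>
    by_cases h3 : t.any (fun f => pvTy f == "CDS") <;>
    by_cases h4 : t.any (fun f => pvTy f == "tRNA" || pvTy f == "rRNA" || pvTy f == "ncRNA" || pvTy f == "misc_RNA") <;>
    simp_all <;> split_ifs <;> omega

theorem fold_rank (l : List (List (String × String))) (a : Int) (ha : 0 ≤ a) :
    l.foldl (fun r f => max r (pvPrio (pvTy f))) a = max a (pvRankC l) := by
  induction l generalizing a with
  | nil => simp [pvRankC]; omega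
  | cons f t ih =>
    simp only [List.foldl_cons]
    rw [ih _ (le_trans ha (le_max_left _ _)), pvRankC_cons, max_assoc]

-- ===== VERDICT (by name: the statement is the Claim_ definition above) =====
theorem classify_region_spec : Claim_equal_classify_region := by
  intro features _ _
  unfold Spec_classify_region classify_region classify_region_alt
  rw [fold_rank _ _ le_rfl]
  by_cases hc : ∃ y ∈ features.map (fun f => pvTy f), y ∈ (["CDS"] : List String)
  · have h1 : PySem.Set.inter (PySem.Set.ofList (features.map (fun f => pvTy f))) (PySem.Set.ofList ["CDS"]) ≠ [] := by
      rw [inter_ofList_ne_nil]; simpa using hc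
    have h2 : features.any (fun f => pvTy f == "CDS") = true := by
      rcases hc with ⟨y, hy, hs⟩
      simp only [List.mem_map] at hy
      rcases hy with ⟨f, hf, rfl⟩
      simp only [List.mem_singleton] at hs
      exact List.any_eq_true.2 ⟨f, hf, by simp [hs]⟩
    simp [h1, pvRankC, h2]
  · have h2 : features.any (fun f => pvTy f == "CDS") = false := by
      rw [Bool.eq_false_iff]
      intro h
      rcases List.any_eq_true.1 h with ⟨f, hf, he⟩
      exact hc ⟨pvTy f, List.mem_map.2 ⟨f, hf, rfl⟩, by simpa using he⟩
    have h1 : PySem.Set.inter (PySem.Set.ofList (features.map (fun f => pvTy f))) (PySem.Set.ofList ["CDS"]) = [] := by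
      by_contra h
      rcases inter_ofList_ne_nil.1 h with ⟨y, hy, hs⟩
      exact hc ⟨y, hy, hs⟩
    by_cases hn : ∃ y ∈ features.map (fun f => pvTy f), y ∈ (["tRNA", "rRNA", "ncRNA", "misc_RNA"] : List String)
    · have h3 : PySem.Set.inter (PySem.Set.ofList (features.map (fun f => pvTy f))) (PySem.Set.ofList ["tRNA", "rRNA", "ncRNA", "misc_RNA"]) ≠ [] := by
        rw [inter_ofList_ne_nil]; simpa using hn
      have h4 : features.any (fun f => pvTy f == "tRNA" || pvTy f == "rRNA" || pvTy f == "ncRNA" || pvTy f == "misc_RNA") = true := by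
        rcases hn with ⟨y, hy, hs⟩
        simp only [List.mem_map] at hy
        rcases hy with ⟨f, hf, rfl⟩
        refine List.any_eq_true.2 ⟨f, hf, ?_⟩
        simp only [List.mem_cons, List.not_mem_nil, or_false] at hs
        rcases hs with h | h | h | h <;> simp [h]
      simp [h1, h3, pvRankC, h2, h4]
    · have h3 : PySem.Set.inter (PySem.Set.ofList (features.map (fun f => pvTy f))) (PySem.Set.ofList ["tRNA", "rRNA", "ncRNA", "misc_RNA"]) = [] := by
        by_contra h
        rcases inter_ofList_ne_nil.1 h with ⟨y, hy, hs⟩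
        exact hn ⟨y, hy, hs⟩
      have h4 : features.any (fun f => pvTy f == "tRNA" || pvTy f == "rRNA" || pvTy f == "ncRNA" || pvTy f == "misc_RNA") = false := by
        rw [Bool.eq_false_iff]
        intro h
        rcases List.any_eq_true.1 h with ⟨f, hf, he⟩
        refine hn ⟨pvTy f, List.mem_map.2 ⟨f, hf, rfl⟩, ?_⟩
        simp only [Bool.or_eq_true, beq_iff_eq] at he
        simp only [List.mem_cons, List.not_mem_nil, or_false]
        tauto
      simp [h1, h3, pvRankC, h2, h4]
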